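-- pv_equiv track=rewrite | github.com/D-Alberto1811/SAT | sat.py | to_int_clauses
-- ===== SOURCE A (Python) =====
-- def to_int_clauses(clauses):
--     var_map, counter, result = {}, 1, []
--     for clause in clauses:
--         int_clause = []
--         for lit in clause:
--             is_neg = lit.startswith("~")
--             var = lit[1:] if is_neg else lit
--             if var not in var_map:
--                 var_map[var] = counter
--                 counter += 1
--             int_clause.append(-var_map[var] if is_neg else var_map[var])
--         result.append(int_clause)
--     return result, var_map
-- ===== SOURCE B (Python) =====
-- def to_int_clauses(clauses):
--     # Two-pass decomposition: first build the complete variable index table,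
--     # then translate all clauses by pure lookup.
--     var_map = {}
--     for clause in clauses:
--         for lit in clause:
--             var = lit[1:] if lit.startswith("~") else lit
--             if var not in var_map:
--                 var_map[var] = len(var_map) + 1
--     result = [[-var_map[lit[1:]] if lit.startswith("~") else var_map[lit]
--                for lit in clause] for clause in clauses]
--     return result, var_map
-- ===== Notes on version B (the rewrite author's own statement) =====
-- stated objective: alternative
-- what changed: Replaces the single interleaved loop carrying (var_map, counter, result) with two separate passes: a first pass that only builds the index table (next index = len(var_map)+1, no counter variable), and a second pure-lookup comprehension that translates every clause.
import Mathlib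
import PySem

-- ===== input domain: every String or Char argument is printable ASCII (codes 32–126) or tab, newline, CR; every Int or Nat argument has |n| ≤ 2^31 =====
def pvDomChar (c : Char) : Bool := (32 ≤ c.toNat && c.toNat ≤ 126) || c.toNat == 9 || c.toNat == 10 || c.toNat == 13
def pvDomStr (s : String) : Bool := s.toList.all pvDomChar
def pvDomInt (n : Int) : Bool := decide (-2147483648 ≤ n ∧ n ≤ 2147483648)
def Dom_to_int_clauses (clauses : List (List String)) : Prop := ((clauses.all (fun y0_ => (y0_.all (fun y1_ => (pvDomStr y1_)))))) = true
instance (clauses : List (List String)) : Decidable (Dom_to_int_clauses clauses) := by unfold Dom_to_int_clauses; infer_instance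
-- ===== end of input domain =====

-- B replaces A's single interleaved loop (carrying var_map, counter and result together) by two
-- separate passes: one that only builds the index table, one pure-lookup translation (alternative).

-- ===== PORT A =====
-- one literal of A's inner loop: state (var_map, counter, int_clause)
def aLitStep (st : PySem.Dict String Int × Int × List Int) (lit : String) :
    PySem.Dict String Int × Int × List Int :=
  let isNeg := PySem.Str.startswith lit "~"
  let var := if isNeg then PySem.Str.slice lit (some 1) none else lit
  let dc : PySem.Dict String Int × Int :=
    if st.1.contains var then (st.1, st.2.1) else (st.1.insert var st.2.1, st.2.1 + 1)
  let v := dc.1.getD var 0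
  (dc.1, dc.2, st.2.2 ++ [if isNeg then -v else v])

-- one clause of A's outer loop: state (var_map, counter, result)
def aClauseStep (st : PySem.Dict String Int × Int × List (List Int)) (clause : List String) :
    PySem.Dict String Int × Int × List (List Int) :=
  let inner := clause.foldl aLitStep (st.1, st.2.1, [])
  (inner.1, inner.2.1, st.2.2 ++ [inner.2.2])

def to_int_clauses (clauses : List (List String)) : List (List Int) × (List (String × Int)) :=
  let st := clauses.foldl aClauseStep (PySem.Dict.empty, 1, [])
  (st.2.2, st.1.items)

-- ===== PORT B =====
-- variable name of a literal
def bVar (lit : String) : String :=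
  if PySem.Str.startswith lit "~" then PySem.Str.slice lit (some 1) none else lit

-- first pass, one literal: record the variable if unseen (next index = size + 1)
def bAdd (d : PySem.Dict String Int) (lit : String) : PySem.Dict String Int :=
  if d.contains (bVar lit) then d else d.insert (bVar lit) ((d.size : Int) + 1)

def bBuild (clauses : List (List String)) : PySem.Dict String Int :=
  clauses.foldl (fun d clause => clause.foldl bAdd d) PySem.Dict.empty

-- second pass: pure lookup
def bTrans (d : PySem.Dict String Int) (lit : String) : Int :=
  if PySem.Str.startswith lit "~" then -(d.getD (bVar lit) 0) else d.getD (bVar lit) 0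

def to_int_clauses_alt (clauses : List (List String)) : List (List Int) × (List (String × Int)) :=
  let d := bBuild clauses
  (clauses.map (fun clause => clause.map (bTrans d)), d.items)

-- ===== PRECONDITION & SPEC =====
def Spec_to_int_clauses (clauses : List (List String)) (out : List (List Int) × (List (String × Int))) : Prop := out = to_int_clauses_alt clauses
instance (clauses : List (List String)) (out : List (List Int) × (List (String × Int))) : Decidable (Spec_to_int_clauses clauses out) := by unfold Spec_to_int_clauses; infer_instance

-- ===== CLAIM (what is proved, stated in full; the proofs are below) =====
def Claim_equal_to_int_clauses : Prop := ∀ (clauses : List (List String)), Dom_to_int_clauses clauses → Spec_to_int_clauses clauses (to_int_clauses clauses)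

-- ===== LEMMAS AND PROOFS =====

-- A's literal step, phrased through bVar (definitional: the two ports compute the same `var`)
theorem aLitStep_pos (d : PySem.Dict String Int) (c : Int) (acc : List Int) (lit : String)
    (hc : d.contains (bVar lit) = true) :
    aLitStep (d, c, acc) lit =
      (d, c, acc ++ [if PySem.Str.startswith lit "~" then -(d.getD (bVar lit) 0)
                     else d.getD (bVar lit) 0]) := by
  show (let dc : PySem.Dict String Int × Int :=
          if d.contains (bVar lit) then (d, c) else (d.insert (bVar lit) c, c + 1)
        let v := dc.1.getD (bVar lit) 0
        (dc.1, dc.2, acc ++ [if PySem.Str.startswith lit "~" then -v else v])) = _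
  rw [if_pos hc]

theorem aLitStep_neg (d : PySem.Dict String Int) (c : Int) (acc : List Int) (lit : String)
    (hc : d.contains (bVar lit) = false) :
    aLitStep (d, c, acc) lit =
      (d.insert (bVar lit) c, c + 1,
        acc ++ [if PySem.Str.startswith lit "~" then -c else c]) := by
  show (let dc : PySem.Dict String Int × Int :=
          if d.contains (bVar lit) then (d, c) else (d.insert (bVar lit) c, c + 1)
        let v := dc.1.getD (bVar lit) 0
        (dc.1, dc.2, acc ++ [if PySem.Str.startswith lit "~" then -v else v])) = _
  rw [if_neg (by simp [hc])]
  show (d.insert (bVar lit) c, c + 1,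
        acc ++ [if PySem.Str.startswith lit "~" then -((d.insert (bVar lit) c).getD (bVar lit) 0)
                else (d.insert (bVar lit) c).getD (bVar lit) 0]) = _
  rw [PySem.Dict.getD_insert_self]

-- bAdd case equations
theorem bAdd_pos {d : PySem.Dict String Int} {lit : String}
    (hc : d.contains (bVar lit) = true) : bAdd d lit = d := by
  unfold bAdd; rw [if_pos hc]

theorem bAdd_neg {d : PySem.Dict String Int} {lit : String}
    (hc : d.contains (bVar lit) = false) :
    bAdd d lit = d.insert (bVar lit) ((d.size : Int) + 1) := by
  unfold bAdd; rw [if_neg (by simp [hc])]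

-- "D extends d": every binding of d is a binding of D (both loops only ever insert fresh keys)
def dle (d D : PySem.Dict String Int) : Prop :=
  ∀ k v, d.get? k = some v → D.get? k = some v

theorem dle_refl (d : PySem.Dict String Int) : dle d d := fun _ _ h => h

theorem dle_trans {a b c : PySem.Dict String Int} (h1 : dle a b) (h2 : dle b c) : dle a c :=
  fun k v h => h2 k v (h1 k v h)

theorem dle_bAdd (d : PySem.Dict String Int) (lit : String) : dle d (bAdd d lit) := by
  intro k v h
  by_cases hc : d.contains (bVar lit) = true
  · rw [bAdd_pos hc]; exact h
  · have hcf : d.contains (bVar lit) = false := by simpa using hc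
    rw [bAdd_neg hcf]
    rcases eq_or_ne k (bVar lit) with rfl | hne
    · rw [(PySem.Dict.get?_eq_none_iff_contains d (bVar lit)).mpr hcf] at h
      exact absurd h (by simp)
    · rwa [PySem.Dict.get?_insert_of_ne d _ hne]

theorem dle_foldl (l : List String) : ∀ d : PySem.Dict String Int, dle d (l.foldl bAdd d) := by
  induction l with
  | nil => intro d; exact dle_refl d
  | cons x xs ih => intro d; exact dle_trans (dle_bAdd d x) (ih (bAdd d x))

theorem dle_buildFrom (cls : List (List String)) :
    ∀ d : PySem.Dict String Int, dle d (cls.foldl (fun d clause => clause.foldl bAdd d) d) := by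
  induction cls with
  | nil => intro d; exact dle_refl d
  | cons c rest ih => intro d; exact dle_trans (dle_foldl c d) (ih (c.foldl bAdd d))

theorem getD_of_dle {d D : PySem.Dict String Int} (h : dle d D) {var : String}
    (hc : d.contains var = true) : D.getD var 0 = d.getD var 0 := by
  rw [PySem.Dict.contains_eq_isSome_get? d var] at hc
  obtain ⟨v, hv⟩ := Option.isSome_iff_exists.mp hc
  rw [PySem.Dict.getD_of_get?_eq_some _ 0 hv, PySem.Dict.getD_of_get?_eq_some _ 0 (h var v hv)]

-- translated value of one literal, when its variable is already in d and D extends d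
theorem bTrans_eq_of_dle {d D : PySem.Dict String Int} (h : dle d D) {lit : String}
    (hc : d.contains (bVar lit) = true) :
    bTrans D lit = (if PySem.Str.startswith lit "~" then -(d.getD (bVar lit) 0)
                    else d.getD (bVar lit) 0) := by
  unfold bTrans
  rw [getD_of_dle h hc]

-- A's inner loop over one clause = B's first-pass fold + B's translations via any extension D
theorem inner_eq (clause : List String) :
    ∀ (d : PySem.Dict String Int) (acc : List Int) (D : PySem.Dict String Int),
      dle (clause.foldl bAdd d) D →
      clause.foldl aLitStep (d, (d.size : Int) + 1, acc) =
        (clause.foldl bAdd d, ((clause.foldl bAdd d).size : Int) + 1,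
          acc ++ clause.map (bTrans D)) := by
  induction clause with
  | nil => intro d acc D _; simp
  | cons lit rest ih =>
    intro d acc D hD
    have hfold : (lit :: rest).foldl bAdd d = rest.foldl bAdd (bAdd d lit) := rfl
    rw [hfold] at hD ⊢
    rw [List.foldl_cons, List.map_cons]
    by_cases hc : d.contains (bVar lit) = true
    · rw [bAdd_pos hc] at hD ⊢
      rw [aLitStep_pos d _ acc lit hc, ← bTrans_eq_of_dle (dle_trans (dle_foldl rest d) hD) hc,
        ih d (acc ++ [bTrans D lit]) D hD, List.append_assoc]
      rfl
    · have hcf : d.contains (bVar lit) = false := by simpa using hc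
      rw [bAdd_neg hcf] at hD ⊢
      have hmem : (d.insert (bVar lit) ((d.size : Int) + 1)).contains (bVar lit) = true :=
        PySem.Dict.contains_insert_self d (bVar lit) _
      have hval : (d.insert (bVar lit) ((d.size : Int) + 1)).getD (bVar lit) 0
          = (d.size : Int) + 1 := PySem.Dict.getD_insert_self d (bVar lit) _ 0
      rw [aLitStep_neg d _ acc lit hcf,
        show ((d.size : Int) + 1) + 1 = (((d.insert (bVar lit) ((d.size : Int) + 1)).size : Int)) + 1 by
          rw [PySem.Dict.size_insert]; simp [hcf],
        ih (d.insert (bVar lit) ((d.size : Int) + 1)) _ D hD]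
      rw [bTrans_eq_of_dle (dle_trans (dle_foldl rest _) hD) hmem, hval, List.append_assoc]
      rfl

-- A's outer loop = B's table-building fold + B's second pass
theorem outer_eq (clauses : List (List String)) :
    ∀ (d : PySem.Dict String Int) (acc : List (List Int)) (D : PySem.Dict String Int),
      dle (clauses.foldl (fun d clause => clause.foldl bAdd d) d) D →
      clauses.foldl aClauseStep (d, (d.size : Int) + 1, acc) =
        (clauses.foldl (fun d clause => clause.foldl bAdd d) d,
         ((clauses.foldl (fun d clause => clause.foldl bAdd d) d).size : Int) + 1,
         acc ++ clauses.map (fun clause => clause.map (bTrans D))) := by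
  induction clauses with
  | nil => intro d acc D _; simp
  | cons clause rest ih =>
    intro d acc D hD
    have hfold : (clause :: rest).foldl (fun d clause => clause.foldl bAdd d) d =
        rest.foldl (fun d clause => clause.foldl bAdd d) (clause.foldl bAdd d) := rfl
    rw [hfold] at hD ⊢
    have hin := inner_eq clause d [] D (dle_trans (dle_buildFrom rest (clause.foldl bAdd d)) hD)
    have hstep : aClauseStep (d, (d.size : Int) + 1, acc) clause =
        (clause.foldl bAdd d, ((clause.foldl bAdd d).size : Int) + 1,
          acc ++ [clause.map (bTrans D)]) := by
      show ((clause.foldl aLitStep (d, (d.size : Int) + 1, [])).1,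
            (clause.foldl aLitStep (d, (d.size : Int) + 1, [])).2.1,
            acc ++ [(clause.foldl aLitStep (d, (d.size : Int) + 1, [])).2.2]) = _
      rw [hin]
      rfl
    rw [List.foldl_cons, hstep, ih (clause.foldl bAdd d) (acc ++ [clause.map (bTrans D)]) D hD,
      List.map_cons, List.append_assoc]
    rfl

-- ===== VERDICT (by name: the statement is the Claim_ definition above) =====
theorem to_int_clauses_spec : Claim_equal_to_int_clauses := by
  intro clauses _
  unfold Spec_to_int_clauses to_int_clauses to_int_clauses_alt bBuild
  have h1 : (1 : Int) = ((PySem.Dict.empty : PySem.Dict String Int).size : Int) + 1 := by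
    simp [PySem.Dict.size_empty]
  rw [h1, outer_eq clauses PySem.Dict.empty []
    (clauses.foldl (fun d clause => clause.foldl bAdd d) PySem.Dict.empty)
    (dle_refl _)]
  simp
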